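-- pv_equiv track=rewrite | github.com/eugeniaangie/license-plate-recognition | postprocess.py | fix_letters
-- ===== SOURCE A (Python) =====
-- def fix_letters(s):
--     """
--     Fix angka yang kebaca di area huruf
--     Used for area code and suffix letters
--     """
--     replacements = {
--         '0': 'O',
--         '1': 'I',
--         '2': 'Z',
--         '3': 'E',
--         '4': 'A',
--         '5': 'S',
--         '6': 'G',
--         '7': 'T',
--         '8': 'B',
--         '9': 'P'
--     }
--     result = s
--     for old, new in replacements.items():
--         result = result.replace(old, new)
--     return result
-- ===== SOURCE B (Python) =====
-- def fix_letters(s):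
--     """
--     Fix angka yang kebaca di area huruf
--     Used for area code and suffix letters
--     """
--     mapping = {
--         '0': 'O', '1': 'I', '2': 'Z', '3': 'E', '4': 'A',
--         '5': 'S', '6': 'G', '7': 'T', '8': 'B', '9': 'P',
--     }
--     return ''.join(mapping.get(c, c) for c in s)
-- ===== Notes on version B (the rewrite author's own statement) =====
-- stated objective: simpler
-- what changed: A rescans the whole string ten times (one str.replace pass per digit); B makes a single pass over the characters with the digit-to-letter dict as a lookup table, joining the mapped characters once.
import Mathlib
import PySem

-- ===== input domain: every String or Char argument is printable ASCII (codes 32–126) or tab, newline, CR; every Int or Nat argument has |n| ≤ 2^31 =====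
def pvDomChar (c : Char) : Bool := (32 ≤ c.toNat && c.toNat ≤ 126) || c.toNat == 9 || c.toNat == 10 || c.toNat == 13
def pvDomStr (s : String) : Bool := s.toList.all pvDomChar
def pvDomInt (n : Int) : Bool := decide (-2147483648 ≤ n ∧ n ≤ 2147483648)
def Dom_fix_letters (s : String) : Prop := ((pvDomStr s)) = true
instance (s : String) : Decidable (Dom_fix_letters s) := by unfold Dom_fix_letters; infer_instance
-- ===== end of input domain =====

-- B replaces A's ten successive full-string replace passes by a single pass with a dict lookup (simpler, same results).

-- ===== PORT A =====
-- A's dict of replacements, in insertion order (items iterated in order).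
def fixLettersPairs : PySem.Dict String String :=
  PySem.Dict.mk [("0","O"),("1","I"),("2","Z"),("3","E"),("4","A"),
                 ("5","S"),("6","G"),("7","T"),("8","B"),("9","P")]

def fix_letters (s : String) : String :=
  fixLettersPairs.items.foldl (fun result p => PySem.Str.replace result p.1 p.2) s

-- ===== PORT B =====
-- B's mapping dict, keyed by single characters.
def fixLettersMap : PySem.Dict Char Char :=
  PySem.Dict.mk [('0','O'),('1','I'),('2','Z'),('3','E'),('4','A'),
                 ('5','S'),('6','G'),('7','T'),('8','B'),('9','P')]

def fix_letters_alt (s : String) : String :=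
  String.ofList (s.toList.map (fun c => fixLettersMap.getD c c))

-- ===== PRECONDITION & SPEC =====
def Spec_fix_letters (s : String) (out : String) : Prop := out = fix_letters_alt s
instance (s : String) (out : String) : Decidable (Spec_fix_letters s out) := by unfold Spec_fix_letters; infer_instance

-- ===== CLAIM (what is proved, stated in full; the proofs are below) =====
def Claim_equal_fix_letters : Prop := ∀ (s : String), Dom_fix_letters s → Spec_fix_letters s (fix_letters s)

-- ===== LEMMAS AND PROOFS =====

-- Replacing a single character by a single character is a map.
theorem replace_go_single (o n : Char) (l acc : List Char) (fuel : Nat)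
    (h : l.length ≤ fuel) :
    PySem.Chars.replace.go [o] [n] fuel l acc =
      acc.reverse ++ l.map (fun c => if c = o then n else c) := by
  induction l generalizing fuel acc with
  | nil =>
    cases fuel <;> simp [PySem.Chars.replace.go]
  | cons c t ih =>
    cases fuel with
    | zero => simp at h
    | succ fuel =>
      simp only [List.length_cons, Nat.succ_le_succ_iff] at h
      by_cases hc : c = o
      · subst hc
        simp [PySem.Chars.replace.go, List.isPrefixOf, ih _ _ h]
      · have : ([o].isPrefixOf (c :: t)) = false := by
          simp [List.isPrefixOf]
          exact fun he => (hc he.symm).elim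
        simp [PySem.Chars.replace.go, this, ih _ _ h, hc]

theorem replace_single (o n : Char) (l : List Char) :
    PySem.Chars.replace l [o] [n] = l.map (fun c => if c = o then n else c) := by
  simp [PySem.Chars.replace, replace_go_single o n l [] l.length le_rfl]

theorem str_replace_single (s : String) (o n : Char) :
    (PySem.Str.replace s (String.ofList [o]) (String.ofList [n])).toList =
      s.toList.map (fun c => if c = o then n else c) := by
  simp only [PySem.Str.toList_replace, String.toList_ofList]
  exact replace_single o n s.toList

-- the per-character agreement of the two pipelines
theorem char_step (c : Char) :
    (fun c => if c = '9' then 'P' else c) ((fun c => if c = '8' then 'B' else c) ((fun c => if c = '7' then 'T' else c) ((fun c => if c = '6' then 'G' else c) ((fun c => if c = '5' then 'S' else c) ((fun c => if c = '4' then 'A' else c) ((fun c => if c = '3' then 'E' else c) ((fun c => if c = '2' then 'Z' else c) ((fun c => if c = '1' then 'I' else c) ((fun c => if c = '0' then 'O' else c) c))))))))) = fixLettersMap.getD c c := by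
  by_cases h0 : c = '0'; · subst h0; decide
  by_cases h1 : c = '1'; · subst h1; decide
  by_cases h2 : c = '2'; · subst h2; decide
  by_cases h3 : c = '3'; · subst h3; decide
  by_cases h4 : c = '4'; · subst h4; decide
  by_cases h5 : c = '5'; · subst h5; decide
  by_cases h6 : c = '6'; · subst h6; decide
  by_cases h7 : c = '7'; · subst h7; decide
  by_cases h8 : c = '8'; · subst h8; decide
  by_cases h9 : c = '9'; · subst h9; decide
  have e : ∀ d : Char, ¬ c = d → (d == c) = false := by
    intro d h
    simp only [beq_eq_false_iff_ne, ne_eq]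
    exact fun he => h he.symm
  simp [fixLettersMap, PySem.Dict.getD, PySem.Dict.get?, List.find?,
        e _ h0, e _ h1, e _ h2, e _ h3, e _ h4, e _ h5, e _ h6, e _ h7, e _ h8, e _ h9,
        h0, h1, h2, h3, h4, h5, h6, h7, h8, h9]

-- the ten per-character maps collapse to one lookup pass
theorem chain_map (l : List Char) :
    (List.map (fun c => if c = '9' then 'P' else c) (List.map (fun c => if c = '8' then 'B' else c) (List.map (fun c => if c = '7' then 'T' else c) (List.map (fun c => if c = '6' then 'G' else c) (List.map (fun c => if c = '5' then 'S' else c) (List.map (fun c => if c = '4' then 'A' else c) (List.map (fun c => if c = '3' then 'E' else c) (List.map (fun c => if c = '2' then 'Z' else c) (List.map (fun c => if c = '1' then 'I' else c) (List.map (fun c => if c = '0' then 'O' else c) l)))))))))) = List.map (fun c => fixLettersMap.getD c c) l := by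
  induction l with
  | nil => simp
  | cons c t ih =>
    simp only [List.map_cons]
    rw [ih]
    exact congrArg (· :: List.map (fun c => fixLettersMap.getD c c) t) (char_step c)

-- ===== VERDICT (by name: the statement is the Claim_ definition above) =====
set_option maxHeartbeats 1000000 in
theorem fix_letters_spec : Claim_equal_fix_letters := by
  intro s _
  show fix_letters s = fix_letters_alt s
  apply String.ext
  rw [show fix_letters s =
      PySem.Str.replace (PySem.Str.replace (PySem.Str.replace (PySem.Str.replace
      (PySem.Str.replace (PySem.Str.replace (PySem.Str.replace (PySem.Str.replace
      (PySem.Str.replace (PySem.Str.replace s "0" "O") "1" "I") "2" "Z") "3" "E")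
      "4" "A") "5" "S") "6" "G") "7" "T") "8" "B") "9" "P" from by
    simp only [fix_letters, fixLettersPairs, List.foldl]]
  rw [show ("0" : String) = String.ofList ['0'] from rfl, show ("O" : String) = String.ofList ['O'] from rfl, show ("1" : String) = String.ofList ['1'] from rfl, show ("I" : String) = String.ofList ['I'] from rfl, show ("2" : String) = String.ofList ['2'] from rfl, show ("Z" : String) = String.ofList ['Z'] from rfl, show ("3" : String) = String.ofList ['3'] from rfl, show ("E" : String) = String.ofList ['E'] from rfl, show ("4" : String) = String.ofList ['4'] from rfl, show ("A" : String) = String.ofList ['A'] from rfl, show ("5" : String) = String.ofList ['5'] from rfl, show ("S" : String) = String.ofList ['S'] from rfl, show ("6" : String) = String.ofList ['6'] from rfl, show ("G" : String) = String.ofList ['G'] from rfl, show ("7" : String) = String.ofList ['7'] from rfl, show ("T" : String) = String.ofList ['T'] from rfl, show ("8" : String) = String.ofList ['8'] from rfl, show ("B" : String) = String.ofList ['B'] from rfl, show ("9" : String) = String.ofList ['9'] from rfl, show ("P" : String) = String.ofList ['P'] from rfl]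
  rw [str_replace_single, str_replace_single, str_replace_single, str_replace_single,
      str_replace_single, str_replace_single, str_replace_single, str_replace_single,
      str_replace_single, str_replace_single]
  rw [chain_map]
  simp only [fix_letters_alt, String.toList_ofList]
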